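-- pv_equiv track=rewrite | github.com/eliottcassidy2000/math | 04-computation/a051240_closedform_derive.py | N4_single
-- ===== SOURCE A (Python) =====
-- from math import gcd, factorial
--
-- def binomial(n, k):
--     if k < 0 or k > n:
--         return 0
--     if k == 0 or k == n:
--         return 1
--     k = min(k, n - k)
--     result = 1
--     for i in range(k):
--         result = result * (n - i) // (i + 1)
--     return result
--
-- def N4_single(r):
--     """Number of orbits on 4-subsets within a single cycle of length r.
--
--     These are necklaces of r beads with exactly 4 marked, under cyclic rotation.
--     = (1/r) * sum_{d|gcd(r,4)} phi(d) * C(r/d, 4/d)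
--     """
--     # Burnside on cyclic group Z_r acting on 4-subsets of [r]
--     # sigma^t fixes a 4-subset iff it's a union of orbits of sigma^t
--     # sigma^t has gcd(t,r) orbits of size r/gcd(t,r)
--     # Need to pick orbits summing to 4
--
--     # More precisely: N4(r) = (1/r) sum_{t=0}^{r-1} f(t)
--     # where f(t) = [x^4] (1 + x^{r/gcd(t,r)})^{gcd(t,r)}
--     total = 0
--     for t in range(r):
--         g = gcd(t, r) if t > 0 else r
--         length = r // g
--         cnt = g
--         # [x^4] (1+x^length)^cnt
--         if length > 4:
--             continue
--         # Enumerate ways: choose j copies of x^length such that j*length = 4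
--         if 4 % length == 0:
--             j = 4 // length
--             if j <= cnt:
--                 total += binomial(cnt, j)
--     assert total % r == 0, f"N4({r}) not integer: {total}/{r}"
--     return total // r
-- ===== SOURCE B (Python) =====
-- from math import gcd, comb
--
-- def N4_single(r):
--     """Number of orbits on 4-subsets within a single cycle of length r.
--
--     Closed form (Burnside collapsed to divisors of gcd(r,4)):
--     N4(r) = (1/r) * sum_{d | gcd(r,4)} phi(d) * C(r/d, 4/d).
--     Divisors of 4 are 1, 2, 4 with phi = 1, 1, 2.
--     """
--     total = 0
--     for d, phi in ((1, 1), (2, 1), (4, 2)):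
--         if gcd(r, 4) % d == 0:
--             n, k = r // d, 4 // d
--             total += phi * (comb(n, k) if 0 <= k <= n else 0)
--     return total // r
-- ===== Notes on version B (the rewrite author's own statement) =====
-- stated objective: faster
-- what changed: Replaces the O(r) Burnside loop over all r rotations (with a hand-rolled binomial per iteration) by the collapsed divisor-sum closed form sum_{d|gcd(r,4)} phi(d)*C(r/d,4/d)/r over the three fixed divisors 1,2,4 of 4; Pre_ only excludes r = 0, where both programs raise ZeroDivisionError.
import Mathlib
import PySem

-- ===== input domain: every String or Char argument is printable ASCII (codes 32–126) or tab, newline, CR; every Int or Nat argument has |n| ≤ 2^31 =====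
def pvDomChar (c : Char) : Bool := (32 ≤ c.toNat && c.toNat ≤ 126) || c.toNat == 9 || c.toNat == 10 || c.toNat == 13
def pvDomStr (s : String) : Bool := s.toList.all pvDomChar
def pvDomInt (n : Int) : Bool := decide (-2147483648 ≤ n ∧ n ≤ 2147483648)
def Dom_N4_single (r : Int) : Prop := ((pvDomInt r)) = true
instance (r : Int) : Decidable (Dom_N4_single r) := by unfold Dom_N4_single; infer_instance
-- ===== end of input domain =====

-- B replaces A's O(r) Burnside loop by the closed divisor-sum form over d | gcd(r,4) (measured faster, asymptotic).

-- ===== PORT A =====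
-- literal port of A's helper binomial(n, k)
def binomialA (n k : Int) : Int :=
  if k < 0 ∨ k > n then 0
  else if k = 0 ∨ k = n then 1
  else
    let k' := min k (n - k)
    (PySem.List.pyRange 0 k' 1).foldl
      (fun result i => PySem.Int.floordiv (result * (n - i)) (i + 1)) 1

-- literal port of A's loop; A's assert 'total % r == 0' never fires for r ≠ 0 (the loop is empty
-- for r < 0, Burnside divisibility for r > 0), so it is omitted; r = 0, where the assert's '%'
-- raises ZeroDivisionError, is excluded by Pre_.
def N4_single (r : Int) : Int :=
  let total := (PySem.List.pyRange 0 r 1).foldl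
    (fun total t =>
      let g : Int := if t > 0 then (Int.gcd t r : Int) else r
      let length := PySem.Int.floordiv r g
      let cnt := g
      if length > 4 then total
      else if PySem.Int.mod 4 length = 0 then
        let j := PySem.Int.floordiv 4 length
        if j ≤ cnt then total + binomialA cnt j else total
      else total) 0
  PySem.Int.floordiv total r

-- ===== PORT B =====
-- Source B's 'comb(n, k) if 0 <= k <= n else 0' (math.comb ported as Nat.choose)
def combB (n k : Int) : Int :=
  if 0 ≤ k ∧ k ≤ n then (Nat.choose n.toNat k.toNat : Int) else 0

def N4_single_alt (r : Int) : Int :=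
  let total := [((1 : Int), (1 : Int)), (2, 1), (4, 2)].foldl
    (fun total dp =>
      if PySem.Int.mod (Int.gcd r 4) dp.1 = 0 then
        total + dp.2 * combB (PySem.Int.floordiv r dp.1) (PySem.Int.floordiv 4 dp.1)
      else total) 0
  PySem.Int.floordiv total r

-- ===== PRECONDITION & SPEC =====
-- Pre_ excludes exactly r = 0, where A (and B alike) raise ZeroDivisionError.
def Pre_N4_single (r : Int) : Prop := r ≠ 0
instance (r : Int) : Decidable (Pre_N4_single r) := by unfold Pre_N4_single; infer_instance
def pvWitness_N4_single : Int := 8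

def Spec_N4_single (r : Int) (out : Int) : Prop := out = N4_single_alt r
instance (r : Int) (out : Int) : Decidable (Spec_N4_single r out) := by unfold Spec_N4_single; infer_instance

-- ===== CLAIM (what is proved, stated in full; the proofs are below) =====
def Claim_equal_N4_single : Prop := ∀ (r : Int), Dom_N4_single r → Pre_N4_single r → Spec_N4_single r (N4_single r)

-- ===== LEMMAS AND PROOFS =====

-- A's per-iteration contribution, as a function of n and g = gcd(n, t), over ℕ.
def Fa (n g : ℕ) : ℕ := if (n / g) ∣ 4 ∧ 4 / (n / g) ≤ g then Nat.choose g (4 / (n / g)) else 0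

-- B's three-term total, over ℕ.
def Tb (n : ℕ) : ℕ :=
  (if 1 ∣ Nat.gcd n 4 then 1 * Nat.choose (n / 1) (4 / 1) else 0)
  + ((if 2 ∣ Nat.gcd n 4 then 2 * 0 + Nat.choose (n / 2) (4 / 2) else 0)
  + (if 4 ∣ Nat.gcd n 4 then 2 * Nat.choose (n / 4) (4 / 4) else 0))

-- A's binomial loop computes the binomial coefficient.
theorem binomialA_loop (n : ℕ) : ∀ kk : ℕ, kk ≤ n →
    (PySem.List.pyRange 0 (kk : Int) 1).foldl
      (fun result i => PySem.Int.floordiv (result * ((n : Int) - i)) (i + 1)) 1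
      = (Nat.choose n kk : Int) := by
  intro kk
  induction kk with
  | zero => intro _; simp [PySem.List.pyRange_one_eq_nil]
  | succ k ih =>
    intro hle
    have hk : k ≤ n := Nat.le_of_succ_le hle
    rw [show ((k + 1 : ℕ) : Int) = (k : Int) + 1 by push_cast; ring,
        PySem.List.pyRange_one_succ_right (by positivity), List.foldl_append, ih hk]
    simp only [List.foldl]
    have hsub : (n : Int) - (k : Int) = ((n - k : ℕ) : Int) := by
      push_cast [hk]; ring
    rw [hsub, show ((k : Int) + 1) = ((k + 1 : ℕ) : Int) by push_cast; ring,
        ← Nat.cast_mul, PySem.Int.floordiv_natCast]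
    congr 1
    rw [← Nat.choose_succ_right_eq n k, Nat.mul_div_cancel _ (Nat.succ_pos k)]

theorem binomialA_eq (n k : ℕ) (h : k ≤ n) : binomialA (n : Int) (k : Int) = (Nat.choose n k : Int) := by
  unfold binomialA
  rw [if_neg (by omega)]
  by_cases h0 : k = 0 ∨ k = n
  · rw [if_pos (by omega)]
    rcases h0 with rfl | rfl <;> simp [Nat.choose_self]
  · rw [if_neg (by omega)]
    have hmin : min (k : Int) ((n : Int) - (k : Int)) = ((min k (n - k) : ℕ) : Int) := by
      push_cast [h]; omega
    simp only [hmin]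
    rw [binomialA_loop n (min k (n-k)) (by omega)]
    congr 1
    rcases Nat.le_total k (n - k) with hle | hle
    · rw [Nat.min_eq_left hle]
    · rw [Nat.min_eq_right hle]
      exact Nat.choose_symm h

-- A's loop body adds Fa n (gcd n t)
theorem bodyA_eq (n : ℕ) (hn : 0 < n) (total t : Int) (ht0 : 0 ≤ t) :
    (let g : Int := if t > 0 then (Int.gcd t (n : Int) : Int) else (n : Int)
     let length := PySem.Int.floordiv (n : Int) g
     let cnt := g
     if length > 4 then total
     else if PySem.Int.mod 4 length = 0 then
       let j := PySem.Int.floordiv 4 length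
       if j ≤ cnt then total + binomialA cnt j else total
     else total)
    = total + (Fa n (Nat.gcd n t.toNat) : Int) := by
  set gN := Nat.gcd n t.toNat with hgN
  have hg : (if t > 0 then (Int.gcd t (n : Int) : Int) else (n : Int)) = (gN : Int) := by
    by_cases hp : t > 0
    · rw [if_pos hp, hgN]
      unfold Int.gcd
      congr 1
      rw [Int.natAbs_natCast, Nat.gcd_comm]
      congr 1
      omega
    · rw [if_neg hp]
      have : t = 0 := le_antisymm (not_lt.1 hp) ht0
      simp [this, hgN]
  simp only [hg]
  have hgdvd : gN ∣ n := Nat.gcd_dvd_left n t.toNat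
  have hgpos : 0 < gN := Nat.gcd_pos_of_pos_left _ hn
  have hL := PySem.Int.floordiv_natCast n gN
  simp only [hL]
  set L := n / gN with hLdef
  have hLpos : 0 < L := Nat.div_pos (Nat.le_of_dvd hn hgdvd) hgpos
  unfold Fa
  by_cases hbig : L > 4
  · rw [if_pos (by exact_mod_cast hbig), if_neg (by rintro ⟨h4, -⟩; have := Nat.le_of_dvd (by norm_num) h4; omega)]
    ring
  · rw [if_neg (by exact_mod_cast hbig)]
    have hmod : PySem.Int.mod 4 (L : Int) = ((4 % L : ℕ) : Int) := by
      exact_mod_cast PySem.Int.mod_natCast 4 L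
    rw [hmod]
    by_cases hdvd : L ∣ 4
    · rw [if_pos (by exact_mod_cast (Iff.symm Nat.dvd_iff_mod_eq_zero).2 hdvd)]
      have hj : PySem.Int.floordiv 4 (L : Int) = ((4 / L : ℕ) : Int) := by
        exact_mod_cast PySem.Int.floordiv_natCast 4 L
      rw [hj]
      by_cases hle : 4 / L ≤ gN
      · rw [if_pos (by exact_mod_cast hle), if_pos ⟨hdvd, hle⟩, binomialA_eq gN (4 / L) hle]
      · rw [if_neg (by exact_mod_cast hle), if_neg (by rintro ⟨-, h⟩; exact hle h)]
        ring
    · rw [if_neg (by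
        intro h
        exact hdvd ((Iff.symm Nat.dvd_iff_mod_eq_zero).1 (by exact_mod_cast h))),
        if_neg (by rintro ⟨h4, -⟩; exact hdvd h4)]
      ring

-- fiber/regrouping: Burnside sum = divisor sum
theorem sum_gcd_eq (n : ℕ) (hn : 0 < n) :
    ∑ t ∈ Finset.range n, Fa n (Nat.gcd n t)
      = ∑ d ∈ n.divisors, Nat.totient d * Fa n (n / d) := by
  rw [← Finset.sum_fiberwise_of_maps_to (g := fun t => Nat.gcd n t) (t := n.divisors)
    (fun x _ => Nat.mem_divisors.2 ⟨Nat.gcd_dvd_left n x, hn.ne'⟩)]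
  rw [← Nat.sum_div_divisors n (fun d => Nat.totient d * Fa n (n / d))]
  refine Finset.sum_congr rfl fun d hd => ?_
  have hdvd : d ∣ n := Nat.dvd_of_mem_divisors hd
  have hdd : n / (n / d) = d := Nat.div_div_self hdvd hn.ne'
  rw [hdd]
  calc ∑ t ∈ Finset.range n with Nat.gcd n t = d, Fa n (Nat.gcd n t)
      = ∑ t ∈ Finset.range n with Nat.gcd n t = d, Fa n d := by
        refine Finset.sum_congr rfl fun t ht => ?_
        rw [(Finset.mem_filter.1 ht).2]
    _ = Nat.totient (n / d) * Fa n d := by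
        rw [Finset.sum_const, smul_eq_mul, ← Nat.totient_div_of_dvd hdvd]

-- evaluate Fa n (n / d) for d ∣ n
theorem Fa_div (n d : ℕ) (hn : 0 < n) (hd : d ∣ n) :
    Fa n (n / d) = if d ∣ 4 then Nat.choose (n / d) (4 / d) else 0 := by
  have hdd : n / (n / d) = d := Nat.div_div_self hd hn.ne'
  unfold Fa
  rw [hdd]
  by_cases h4 : d ∣ 4
  · rw [if_pos h4]
    by_cases hle : 4 / d ≤ n / d
    · rw [if_pos ⟨h4, hle⟩]
    · rw [if_neg (by tauto), Nat.choose_eq_zero_of_lt (by omega)]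
  · rw [if_neg (by tauto), if_neg h4]

-- the divisor sum collapses to divisors of gcd(n, 4)
theorem sum_divisors_collapse (n : ℕ) (hn : 0 < n) :
    ∑ d ∈ n.divisors, Nat.totient d * (if d ∣ 4 then Nat.choose (n / d) (4 / d) else 0)
      = ∑ d ∈ (Nat.gcd n 4).divisors, Nat.totient d * Nat.choose (n / d) (4 / d) := by
  rw [← Nat.divisors_filter_dvd_of_dvd hn.ne' (Nat.gcd_dvd_left n 4)]
  rw [Finset.sum_filter]
  refine Finset.sum_congr rfl fun d hd => ?_
  have hdvd : d ∣ n := Nat.dvd_of_mem_divisors hd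
  have hiff : d ∣ Nat.gcd n 4 ↔ d ∣ 4 :=
    ⟨fun h => h.trans (Nat.gcd_dvd_right n 4), fun h => Nat.dvd_gcd hdvd h⟩
  rw [mul_ite, mul_zero]
  exact if_congr hiff.symm rfl rfl

-- the collapsed divisor sum equals B's three-term total (g will be gcd n 4)
theorem divsum_eq_Tb_aux (g n : ℕ) (hgdvd : g ∣ 4) (hgpos : 0 < g) :
    ∑ d ∈ g.divisors, Nat.totient d * Nat.choose (n / d) (4 / d)
      = (if 1 ∣ g then 1 * Nat.choose (n / 1) (4 / 1) else 0)
        + ((if 2 ∣ g then 2 * 0 + Nat.choose (n / 2) (4 / 2) else 0)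
        + (if 4 ∣ g then 2 * Nat.choose (n / 4) (4 / 4) else 0)) := by
  have hle : g ≤ 4 := Nat.le_of_dvd (by norm_num) hgdvd
  interval_cases g
  · rw [show (1 : ℕ).divisors = {1} by decide, Finset.sum_singleton]
    norm_num [Nat.totient_one]
  · rw [show (2 : ℕ).divisors = {1, 2} by decide,
        Finset.sum_insert (by decide), Finset.sum_singleton]
    norm_num [Nat.totient_one, show Nat.totient 2 = 1 by decide]
  · exact absurd hgdvd (by decide)
  · rw [show (4 : ℕ).divisors = {1, 2, 4} by decide,
        Finset.sum_insert (by decide), Finset.sum_insert (by decide), Finset.sum_singleton]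
    norm_num [Nat.totient_one, show Nat.totient 2 = 1 by decide,
      show Nat.totient 4 = 2 by decide]

theorem divsum_eq_Tb (n : ℕ) (hn : 0 < n) :
    ∑ d ∈ (Nat.gcd n 4).divisors, Nat.totient d * Nat.choose (n / d) (4 / d) = Tb n := by
  exact divsum_eq_Tb_aux (Nat.gcd n 4) n (Nat.gcd_dvd_right n 4)
    (Nat.gcd_pos_of_pos_left _ hn)

-- combB on casts of naturals is the binomial coefficient
theorem combB_eq (a b : ℕ) : combB (a : Int) (b : Int) = (Nat.choose a b : Int) := by
  unfold combB
  by_cases h : b ≤ a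
  · rw [if_pos ⟨Int.natCast_nonneg b, by exact_mod_cast h⟩]
    simp
  · rw [if_neg (by rintro ⟨-, hba⟩; exact h (by exact_mod_cast hba)),
        Nat.choose_eq_zero_of_lt (by omega), Nat.cast_zero]

-- combB vanishes on a negative first argument
theorem combB_neg (a k : Int) (ha : a < 0) (hk : 0 < k) : combB a k = 0 := by
  unfold combB
  rw [if_neg (by rintro ⟨h0, hle⟩; omega)]

-- A's whole loop, as a natural-number sum
theorem totalA_eq (n : ℕ) (hn : 0 < n) :
    (PySem.List.pyRange 0 (n : Int) 1).foldl
      (fun total t =>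
        let g : Int := if t > 0 then (Int.gcd t (n : Int) : Int) else (n : Int)
        let length := PySem.Int.floordiv (n : Int) g
        let cnt := g
        if length > 4 then total
        else if PySem.Int.mod 4 length = 0 then
          let j := PySem.Int.floordiv 4 length
          if j ≤ cnt then total + binomialA cnt j else total
        else total) 0
      = ((∑ t ∈ Finset.range n, Fa n (Nat.gcd n t) : ℕ) : Int) := by
  rw [PySem.List.foldl_congr_mem _ _
      (fun total t => total + (Fa n (Nat.gcd n t.toNat) : Int)) 0
      (fun acc x hx => bodyA_eq n hn acc x (PySem.List.mem_pyRange_one.1 hx).1)]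
  rw [PySem.List.foldl_add, zero_add, PySem.List.pyRange_zero_nat, List.map_map]
  have : ((fun t : Int => (Fa n (Nat.gcd n t.toNat) : Int)) ∘ fun k : ℕ => (k : Int))
      = fun k : ℕ => (Fa n (Nat.gcd n k) : Int) := by
    funext k; simp
  rw [this]
  push_cast
  rfl

-- B's whole fold, as a natural-number total
theorem totalB_eq (n : ℕ) :
    ([((1 : Int), (1 : Int)), (2, 1), (4, 2)]).foldl
      (fun total dp =>
        if PySem.Int.mod (Int.gcd (n : Int) 4) dp.1 = 0 then
          total + dp.2 * combB (PySem.Int.floordiv (n : Int) dp.1) (PySem.Int.floordiv 4 dp.1)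
        else total) 0
      = ((Tb n : ℕ) : Int) := by
  have hgcd : ((Int.gcd (n : Int) 4 : ℕ) : Int) = ((Nat.gcd n 4 : ℕ) : Int) := by
    simp [Int.gcd]
  simp only [List.foldl, hgcd]
  have c1 : PySem.Int.mod ((Nat.gcd n 4 : ℕ) : Int) 1 = 0 := by
    have h := PySem.Int.mod_natCast (Nat.gcd n 4) 1
    rw [Nat.mod_one] at h
    exact_mod_cast h
  have c2 : PySem.Int.mod ((Nat.gcd n 4 : ℕ) : Int) 2 = 0 ↔ 2 ∣ Nat.gcd n 4 := by
    rw [PySem.Int.mod_eq_zero_iff_dvd]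
    exact_mod_cast Int.natCast_dvd_natCast (m := 2) (n := Nat.gcd n 4)
  have c4 : PySem.Int.mod ((Nat.gcd n 4 : ℕ) : Int) 4 = 0 ↔ 4 ∣ Nat.gcd n 4 := by
    rw [PySem.Int.mod_eq_zero_iff_dvd]
    exact_mod_cast Int.natCast_dvd_natCast (m := 4) (n := Nat.gcd n 4)
  have f1 : PySem.Int.floordiv (n : Int) 1 = ((n / 1 : ℕ) : Int) := by
    exact_mod_cast PySem.Int.floordiv_natCast n 1
  have f2 : PySem.Int.floordiv (n : Int) 2 = ((n / 2 : ℕ) : Int) := by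
    exact_mod_cast PySem.Int.floordiv_natCast n 2
  have f4 : PySem.Int.floordiv (n : Int) 4 = ((n / 4 : ℕ) : Int) := by
    exact_mod_cast PySem.Int.floordiv_natCast n 4
  have g1 : PySem.Int.floordiv 4 1 = ((4 / 1 : ℕ) : Int) := by
    exact_mod_cast PySem.Int.floordiv_natCast 4 1
  have g2 : PySem.Int.floordiv 4 2 = ((4 / 2 : ℕ) : Int) := by
    exact_mod_cast PySem.Int.floordiv_natCast 4 2
  have g4 : PySem.Int.floordiv 4 4 = ((4 / 4 : ℕ) : Int) := by
    exact_mod_cast PySem.Int.floordiv_natCast 4 4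
  rw [f1, f2, f4, g1, g2, g4, if_pos c1, combB_eq, combB_eq, combB_eq]
  unfold Tb
  rw [if_pos (one_dvd _)]
  by_cases h2 : 2 ∣ Nat.gcd n 4 <;> by_cases h4 : 4 ∣ Nat.gcd n 4 <;>
    simp only [if_pos, h2, h4, c2, c4, if_false] <;>
    push_cast <;> ring

-- ===== VERDICT (by name: the statement is the Claim_ definition above) =====
theorem N4_single_spec : Claim_equal_N4_single := by
  unfold Claim_equal_N4_single
  intro r _ hpre
  unfold Spec_N4_single N4_single N4_single_alt
  rcases lt_trichotomy r 0 with hneg | h0 | hpos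
  · -- r < 0: A's loop is empty, every B term is 0
    rw [PySem.List.pyRange_one_eq_nil (le_of_lt hneg)]
    simp only [List.foldl]
    have z1 : combB (PySem.Int.floordiv r 1) (PySem.Int.floordiv 4 1) = 0 := by
      apply combB_neg
      · rw [PySem.Int.floordiv_lt_iff_lt_mul (by norm_num)]; omega
      · rw [show PySem.Int.floordiv 4 1 = ((4 / 1 : ℕ) : Int) from
          by exact_mod_cast PySem.Int.floordiv_natCast 4 1]; norm_num
    have z2 : combB (PySem.Int.floordiv r 2) (PySem.Int.floordiv 4 2) = 0 := by
      apply combB_neg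
      · rw [PySem.Int.floordiv_lt_iff_lt_mul (by norm_num)]; omega
      · rw [show PySem.Int.floordiv 4 2 = ((4 / 2 : ℕ) : Int) from
          by exact_mod_cast PySem.Int.floordiv_natCast 4 2]; norm_num
    have z4 : combB (PySem.Int.floordiv r 4) (PySem.Int.floordiv 4 4) = 0 := by
      apply combB_neg
      · rw [PySem.Int.floordiv_lt_iff_lt_mul (by norm_num)]; omega
      · rw [show PySem.Int.floordiv 4 4 = ((4 / 4 : ℕ) : Int) from
          by exact_mod_cast PySem.Int.floordiv_natCast 4 4]; norm_num
    rw [z1, z2, z4]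
    split_ifs <;> norm_num
  · exact absurd h0 hpre
  · -- r > 0
    obtain ⟨n, rfl⟩ : ∃ n : ℕ, r = (n : Int) := ⟨r.toNat, (Int.toNat_of_nonneg (le_of_lt hpos)).symm⟩
    have hn : 0 < n := by exact_mod_cast hpos
    have hST : (∑ t ∈ Finset.range n, Fa n (Nat.gcd n t)) = Tb n := by
      rw [sum_gcd_eq n hn,
          Finset.sum_congr rfl (fun d hd => by
            rw [Fa_div n d hn (Nat.dvd_of_mem_divisors hd)]),
          sum_divisors_collapse n hn, divsum_eq_Tb n hn]
    rw [totalA_eq n hn, totalB_eq n, hST]
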